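-- pv_equiv track=rewrite | github.com/ShajahanAI/codewars | python/7 kyu/286.py | party_people
-- ===== SOURCE A (Python) =====
-- def party_people(lst):
--     sorted_arr = sorted(lst)
--     for _ in range(len(sorted_arr)):
--         if len(sorted_arr) >= sorted_arr[-1]:
--             break
--
--         sorted_arr.pop()
--
--     remaining_people_count = len(sorted_arr)
--     return remaining_people_count
-- ===== SOURCE B (Python) =====
-- def party_people(lst):
--     count = 0
--     for i, v in enumerate(sorted(lst), 1):
--         if v <= i:
--             count = i
--     return count
-- ===== Notes on version B (the rewrite author's own statement) =====
-- stated objective: simpler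
-- what changed: Replaces A's destructive pop-from-the-top loop with early break by a single forward enumerate scan over the sorted list that keeps the largest index i with sorted[i-1] <= i.
import Mathlib
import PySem

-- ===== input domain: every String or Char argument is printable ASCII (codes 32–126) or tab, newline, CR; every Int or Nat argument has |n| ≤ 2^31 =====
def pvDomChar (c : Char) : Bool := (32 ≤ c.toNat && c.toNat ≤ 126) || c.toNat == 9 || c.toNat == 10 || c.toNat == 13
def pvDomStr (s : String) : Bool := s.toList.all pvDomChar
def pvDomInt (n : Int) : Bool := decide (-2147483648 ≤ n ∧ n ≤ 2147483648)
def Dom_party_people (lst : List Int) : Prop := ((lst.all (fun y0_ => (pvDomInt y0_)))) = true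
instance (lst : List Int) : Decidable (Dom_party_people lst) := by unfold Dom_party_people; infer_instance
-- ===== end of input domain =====

-- B replaces A's pop-from-the-top loop by one forward scan keeping the last valid index (simpler decomposition).

-- ===== PORT A =====
-- the for-loop over range(len(sorted_arr)): fuel = initial length; each iteration either
-- breaks (condition len >= last element) or pops the last element (.pop() on a nonempty
-- list = dropLast). The list is never empty when sorted_arr[-1] is read (fuel = initial
-- length, one pop per iteration), so the `none` branch is unreachable.
def partyLoopA : Nat → List Int → List Int
  | 0, s => s
  | n + 1, s =>
    match s.getLast? with
    | none => s
    | some v => if (s.length : Int) ≥ v then s else partyLoopA n s.dropLast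

def party_people (lst : List Int) : Int :=
  let sorted_arr := PySem.List.sorted lst (fun x => x) false
  ((partyLoopA sorted_arr.length sorted_arr).length : Int)

-- ===== PORT B =====
-- enumerate(sorted(lst), 1) is zipIdx 1 (pair order (value, index)); count accumulator via foldl
def party_people_alt (lst : List Int) : Int :=
  ((PySem.List.sorted lst (fun x => x) false).zipIdx 1).foldl
    (fun count vi => if vi.1 ≤ (vi.2 : Int) then (vi.2 : Int) else count) 0

-- ===== PRECONDITION & SPEC =====
def Spec_party_people (lst : List Int) (out : Int) : Prop := out = party_people_alt lst
instance (lst : List Int) (out : Int) : Decidable (Spec_party_people lst out) := by unfold Spec_party_people; infer_instance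

-- ===== CLAIM (what is proved, stated in full; the proofs are below) =====
def Claim_equal_party_people : Prop := ∀ (lst : List Int), Dom_party_people lst → Spec_party_people lst (party_people lst)

-- ===== LEMMAS AND PROOFS =====
theorem partyLoop_eq_fold (s : List Int) :
    ((partyLoopA s.length s).length : Int) =
      (s.zipIdx 1).foldl (fun count vi => if vi.1 ≤ (vi.2 : Int) then (vi.2 : Int) else count) 0 := by
  induction s using List.reverseRecOn with
  | nil => simp [partyLoopA]
  | append_singleton t v ih =>
    have hz : ((t ++ [v]).zipIdx 1) = t.zipIdx 1 ++ [(v, 1 + t.length)] := by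
      rw [List.zipIdx_append]; simp [List.zipIdx]
    have hlen : (t ++ [v]).length = t.length + 1 := by simp
    rw [hz, List.foldl_append, List.foldl_cons, List.foldl_nil, hlen, partyLoopA]
    simp only [List.getLast?_concat, hlen]
    by_cases h : v ≤ (t.length : Int) + 1
    · rw [if_pos (by push_cast; omega), if_pos (by push_cast; omega), hlen]
      push_cast; ring
    · rw [if_neg (by push_cast; omega), if_neg (by push_cast; omega),
        List.dropLast_concat]
      exact ih

-- ===== VERDICT (by name: the statement is the Claim_ definition above) =====
theorem party_people_spec : Claim_equal_party_people := by
  intro lst _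
  unfold Spec_party_people party_people party_people_alt
  exact partyLoop_eq_fold _
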